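-- pv_equiv track=rewrite | github.com/Joyful-Buffalo/asr | ctc_test.py | normalize_state_dict
-- ===== SOURCE A (Python) =====
-- from typing import Any, Dict, Iterator, List, Optional, Tuple, cast
--
-- def _strip_prefix(state: Dict[str, Any], prefix: str) -> Dict[str, Any]:
--     return {k[len(prefix):] if k.startswith(prefix) else k: v for k, v in state.items()}
--
-- def normalize_state_dict(state: Dict[str, Any]) -> Tuple[Dict[str, Any], str]:
--     if not state:
--         return state, "empty"
--
--     keys = list(state.keys())
--
--     for p in ("_orig_mod.", "module."):
--         if all(k.startswith(p) for k in keys):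
--             return _strip_prefix(state, p), f"strip_all:{p}"
--
--     for p in ("_orig_mod.", "module."):
--         n = sum(1 for k in keys if k.startswith(p))
--         if n >= int(0.9 * len(keys)):
--             return _strip_prefix(state, p), f"strip_most({n}/{len(keys)}):{p}"
--
--     return state, "no_strip"
-- ===== SOURCE B (Python) =====
-- def _strip_prefix(state, prefix):
--     out = {}
--     for k, v in state.items():
--         out[k[len(prefix):] if k.startswith(prefix) else k] = v
--     return out
--
-- def normalize_state_dict(state):
--     n = len(state)
--     if n == 0:
--         return state, "empty"
--     # Hash-group the keys by their leading dot-segment (everything up to and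
--     # including the first "."): a key starts with "_orig_mod." or "module."
--     # exactly when its leading segment equals that prefix, so one grouping
--     # pass over the keys replaces every per-prefix startswith scan.
--     freq = {}
--     for k in state:
--         dot = k.find(".")
--         seg = k[: dot + 1] if dot != -1 else k
--         freq[seg] = freq.get(seg, 0) + 1
--     c_orig = freq.get("_orig_mod.", 0)
--     c_mod = freq.get("module.", 0)
--     if c_orig == n:
--         return _strip_prefix(state, "_orig_mod."), "strip_all:_orig_mod."
--     if c_mod == n:
--         return _strip_prefix(state, "module."), "strip_all:module."
--     thr = int(0.9 * n)
--     if c_orig >= thr: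
--         return _strip_prefix(state, "_orig_mod."), f"strip_most({c_orig}/{n}):_orig_mod."
--     if c_mod >= thr:
--         return _strip_prefix(state, "module."), f"strip_most({c_mod}/{n}):module."
--     return state, "no_strip"
-- ===== Notes on version B (the rewrite author's own statement) =====
-- stated objective: alternative
-- what changed: B never runs a per-prefix startswith scan: it hash-groups the keys by their leading dot-segment in one pass (a frequency table keyed by the segment up to and including the first '.'), then decides every tier by O(1) table lookups, exploiting that a key starts with '_orig_mod.'/'module.' exactly when its leading segment equals it; A instead runs four separate all()/sum() startswith scans over the key list.
import Mathlib
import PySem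

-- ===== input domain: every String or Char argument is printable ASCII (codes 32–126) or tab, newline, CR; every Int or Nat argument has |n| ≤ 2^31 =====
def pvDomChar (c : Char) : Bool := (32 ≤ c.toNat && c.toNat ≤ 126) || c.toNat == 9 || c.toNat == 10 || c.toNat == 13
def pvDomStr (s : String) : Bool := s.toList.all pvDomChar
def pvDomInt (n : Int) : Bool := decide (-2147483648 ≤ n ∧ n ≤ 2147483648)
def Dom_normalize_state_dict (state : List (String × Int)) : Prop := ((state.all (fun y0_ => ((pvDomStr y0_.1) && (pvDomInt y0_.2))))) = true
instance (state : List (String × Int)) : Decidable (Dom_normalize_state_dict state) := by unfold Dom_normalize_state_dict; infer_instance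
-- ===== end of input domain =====

-- B replaces A's per-prefix startswith scans by one hash-grouping pass over the keys
-- (frequency table keyed by each key's leading dot-segment), then O(1) table lookups
-- decide the tiers (objective: alternative decomposition).

-- Shared float-semantics helper: the exact value of Python's `int(0.9 * n)` for n ≥ 0
-- (0.9 is the IEEE-754 double 8106479329266893/2^53; the exact product is rounded to
-- nearest-even at 53 significant bits, then truncated).  Both ports use it as the threshold.
def pyTrunc09 (n : Nat) : Nat :=
  if n = 0 then 0 else
    let p := n * 8106479329266893
    let b := Nat.log2 p
    if b ≤ 52 then p / 2 ^ 53
    else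
      let s := b - 52
      let q := p / 2 ^ s
      let r := p % 2 ^ s
      let half := 2 ^ (s - 1)
      let q' := if half < r then q + 1
                else if r < half then q
                else if q % 2 = 0 then q else q + 1
      (q' * 2 ^ s) / 2 ^ 53

-- ===== PORT A =====
-- _strip_prefix: dict comprehension rebuilding the dict with stripped keys (dict semantics via PySem.Dict)
def stripPrefixA (state : List (String × Int)) (p : String) : List (String × Int) :=
  (state.foldl
    (fun (d : PySem.Dict String Int) kv =>
      d.insert
        (if PySem.Str.startswith kv.1 p then PySem.Str.slice kv.1 (some (PySem.Str.len p)) none else kv.1)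
        kv.2)
    PySem.Dict.empty).items

def normalize_state_dict (state : List (String × Int)) : (List (String × Int)) × String :=
  if state = [] then (state, "empty")
  else
    let keys := state.map (·.1)
    match ["_orig_mod.", "module."].find? (fun p => keys.all (fun k => PySem.Str.startswith k p)) with
    | some p => (stripPrefixA state p, "strip_all:" ++ p)
    | none =>
      match ["_orig_mod.", "module."].findSome? (fun p =>
          let n : Int := keys.foldl (fun a k => if PySem.Str.startswith k p then a + 1 else a) 0
          if (pyTrunc09 keys.length : Int) ≤ n then some (p, n) else none) with
      | some (p, n) =>
          (stripPrefixA state p,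
           "strip_most(" ++ PySem.Int.toStr n ++ "/" ++ PySem.Int.toStr keys.length ++ "):" ++ p)
      | none => (state, "no_strip")

-- ===== PORT B =====
-- _strip_prefix: explicit loop inserting each (possibly stripped) key into a fresh dict
def stripPrefixB (state : List (String × Int)) (p : String) : List (String × Int) :=
  (state.foldl
    (fun (d : PySem.Dict String Int) kv =>
      d.insert
        (if PySem.Str.startswith kv.1 p then PySem.Str.slice kv.1 (some (PySem.Str.len p)) none else kv.1)
        kv.2)
    PySem.Dict.empty).items

-- the leading dot-segment of a key: k[:k.find(".")+1] if "." occurs in k, else k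
def segOf (k : String) : String :=
  let dot := PySem.Str.find k "."
  if dot = -1 then k else PySem.Str.slice k none (some (dot + 1))

def normalize_state_dict_alt (state : List (String × Int)) : (List (String × Int)) × String :=
  if state = [] then (state, "empty")
  else
    let n : Int := state.length
    -- one hash-grouping pass: frequency table keyed by each key's leading dot-segment
    let freq : PySem.Dict String Int := state.foldl
      (fun d kv => d.insert (segOf kv.1) (d.getD (segOf kv.1) 0 + 1)) PySem.Dict.empty
    let cOrig := freq.getD "_orig_mod." 0
    let cMod := freq.getD "module." 0
    if cOrig = n then (stripPrefixB state "_orig_mod.", "strip_all:_orig_mod.")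
    else if cMod = n then (stripPrefixB state "module.", "strip_all:module.")
    else
      let thr : Int := (pyTrunc09 state.length : Int)
      if thr ≤ cOrig then
        (stripPrefixB state "_orig_mod.",
         "strip_most(" ++ PySem.Int.toStr cOrig ++ "/" ++ PySem.Int.toStr n ++ "):_orig_mod.")
      else if thr ≤ cMod then
        (stripPrefixB state "module.",
         "strip_most(" ++ PySem.Int.toStr cMod ++ "/" ++ PySem.Int.toStr n ++ "):module.")
      else (state, "no_strip")

-- ===== PRECONDITION & SPEC =====
def Spec_normalize_state_dict (state : List (String × Int)) (out : (List (String × Int)) × String) : Prop := out = normalize_state_dict_alt state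
instance (state : List (String × Int)) (out : (List (String × Int)) × String) : Decidable (Spec_normalize_state_dict state out) := by unfold Spec_normalize_state_dict; infer_instance

-- ===== CLAIM (what is proved, stated in full; the proofs are below) =====
def Claim_equal_normalize_state_dict : Prop := ∀ (state : List (String × Int)), Dom_normalize_state_dict state → Spec_normalize_state_dict state (normalize_state_dict state)

-- ===== LEMMAS AND PROOFS =====

theorem strip_eq : stripPrefixA = stripPrefixB := rfl

-- a singleton list is a prefix iff it is the head
theorem singleton_prefix_iff (c : Char) (l : List Char) : [c] <+: l ↔ l.head? = some c := by
  cases l with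
  | nil => simp
  | cons x xs =>
    constructor
    · rintro ⟨t, ht⟩
      simp only [List.singleton_append, List.cons.injEq] at ht
      simp [ht.1]
    · intro h
      simp only [List.head?_cons, Option.some.injEq] at h
      exact ⟨xs, by simp [h]⟩

-- core: the leading dot-segment (computed from find/slice) equals pre ++ ['.'] iff
-- the list starts with pre ++ ['.'], for pre free of dots
theorem segList_eq_iff (l pre : List Char) (hp : '.' ∉ pre) :
    (if PySem.Chars.find l ['.'] = -1 then l
     else PySem.List.slice l none (some (PySem.Chars.find l ['.'] + 1))) = pre ++ ['.']
    ↔ (pre ++ ['.']) <+: l := by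
  by_cases hi : PySem.Chars.find l ['.'] = -1
  · have hnin : ¬ ['.'] <:+: l := (PySem.Chars.find_eq_neg_one_iff l ['.']).mp hi
    rw [if_pos hi]
    constructor
    · intro h
      exact absurd ⟨pre, [], by simp [h]⟩ hnin
    · rintro ⟨t, ht⟩
      exact absurd ⟨pre, t, by simp [← ht]⟩ hnin
  · have hge : 0 ≤ PySem.Chars.find l ['.'] := by
      have := PySem.Chars.neg_one_le_find l ['.']
      omega
    obtain ⟨hpref, hmin⟩ := PySem.Chars.find_spec (s := l) (sub := ['.']) hge
    set i := PySem.Chars.find l ['.'] with hidef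
    have hslice : PySem.List.slice l none (some (i + 1)) = l.take (i.toNat + 1) := by
      rw [PySem.List.slice_to l (by omega)]
      congr 1
      omega
    rw [if_neg hi, hslice]
    constructor
    · intro h
      rw [← h]
      exact List.take_prefix _ l
    · rintro ⟨t, ht⟩
      have hteq : l = pre ++ '.' :: t := by simpa using ht.symm
      have hIle : i.toNat ≤ pre.length := by
        by_contra hlt
        push_neg at hlt
        have hd : l.drop pre.length = '.' :: t := by rw [hteq]; simp
        exact hmin pre.length hlt (hd ▸ ⟨t, rfl⟩)
      have hIge : pre.length ≤ i.toNat := by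
        by_contra hlt
        push_neg at hlt
        have hhead : (l.drop i.toNat).head? = some '.' :=
          (singleton_prefix_iff _ _).mp hpref
        have hget : l.drop i.toNat = pre.drop i.toNat ++ '.' :: t := by
          rw [hteq, List.drop_append_of_le_length (by omega)]
        have hne : pre.drop i.toNat ≠ [] := by
          intro h0
          have := List.drop_eq_nil_iff.mp h0
          omega
        obtain ⟨a, as, has⟩ := List.exists_cons_of_ne_nil hne
        rw [hget, has, List.cons_append, List.head?_cons] at hhead
        have ha : a = '.' := by simpa using hhead
        have hmem : a ∈ pre := by
          have : a ∈ pre.drop i.toNat := by rw [has]; exact List.mem_cons_self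
          exact List.mem_of_mem_drop this
        rw [ha] at hmem
        exact hp hmem
      have hieq : i.toNat = pre.length := le_antisymm hIle hIge
      rw [hteq, hieq, List.take_append]
      simp

-- segOf k = p iff k starts with p, for p whose only '.' is its last character
theorem segOf_eq_iff (k p : String) (hp : '.' ∉ p.toList.dropLast)
    (hlast : p.toList.getLast? = some '.') :
    (segOf k = p) ↔ PySem.Str.startswith k p = true := by
  have hne : p.toList ≠ [] := by
    intro h0
    rw [h0] at hlast
    simp at hlast
  have hpl : p.toList = p.toList.dropLast ++ ['.'] := by
    have h1 : p.toList.getLast hne = '.' := by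
      rw [List.getLast?_eq_some_getLast hne] at hlast
      simpa using hlast
    conv_lhs => rw [← List.dropLast_append_getLast hne]
    rw [h1]
  rw [PySem.Str.startswith_eq, PySem.Chars.startswith_iff]
  have hseg : (segOf k).toList =
      (if PySem.Chars.find k.toList ['.'] = -1 then k.toList
       else PySem.List.slice k.toList none (some (PySem.Chars.find k.toList ['.'] + 1))) := by
    unfold segOf
    by_cases h : PySem.Str.find k "." = -1 <;>
      simp [PySem.Str.find_eq, h] at * <;>
      simp [h, PySem.Str.toList_slice]
  constructor
  · intro h
    have h2 : (segOf k).toList = p.toList := by rw [h]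
    rw [hseg, hpl] at h2
    have h3 := (segList_eq_iff k.toList p.toList.dropLast hp).mp h2
    rw [← hpl] at h3
    exact h3
  · intro h
    rw [hpl] at h
    have h3 := (segList_eq_iff k.toList p.toList.dropLast hp).mpr h
    rw [← hpl] at h3
    apply String.ext
    rw [hseg, h3]

-- the grouping-table lookup counts the keys whose leading segment is p
theorem freq_getD (state : List (String × Int)) (p : String) :
    (state.foldl
      (fun (d : PySem.Dict String Int) kv => d.insert (segOf kv.1) (d.getD (segOf kv.1) 0 + 1))
      PySem.Dict.empty).getD p 0
    = ((state.map (fun kv => segOf kv.1)).count p : Int) := by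
  rw [show (state.foldl
      (fun (d : PySem.Dict String Int) kv => d.insert (segOf kv.1) (d.getD (segOf kv.1) 0 + 1))
      PySem.Dict.empty)
    = ((state.map (fun kv => segOf kv.1)).foldl
        (fun (d : PySem.Dict String Int) s => d.insert s (d.getD s 0 + 1)) PySem.Dict.empty) by
      rw [List.foldl_map]]
  rw [PySem.Dict.getD_foldl_insert_add_one]
  simp

theorem count_seg_eq_countP (state : List (String × Int)) (p : String)
    (hp : '.' ∉ p.toList.dropLast) (hlast : p.toList.getLast? = some '.') :
    (state.map (fun kv => segOf kv.1)).count p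
    = (state.map Prod.fst).countP (fun k => PySem.Str.startswith k p) := by
  rw [List.count_eq_countP, List.countP_map, List.countP_map]
  apply List.countP_congr
  intro kv _
  simp only [Function.comp]
  rw [beq_iff_eq]
  exact segOf_eq_iff kv.1 p hp hlast

theorem foldl_count (l : List String) (p : String → Bool) (a : Int) :
    l.foldl (fun a k => if p k then a + 1 else a) a = a + (l.countP p : Int) :=
  PySem.List.foldl_if_add_one p l a

theorem all_iff_countP_eq (l : List String) (p : String → Bool) :
    (l.all p = true) ↔ l.countP p = l.length := by
  rw [List.all_eq_true, List.countP_eq_length]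

theorem normalize_state_dict_spec : Claim_equal_normalize_state_dict := by
  intro state _
  unfold Spec_normalize_state_dict normalize_state_dict normalize_state_dict_alt
  by_cases hne : state = []
  · simp [hne]
  · have hc1 := freq_getD state "_orig_mod."
    have hc2 := freq_getD state "module."
    rw [count_seg_eq_countP state _ (by decide) (by decide)] at hc1
    rw [count_seg_eq_countP state _ (by decide) (by decide)] at hc2
    have ha1 := foldl_count (state.map Prod.fst) (fun k => PySem.Str.startswith k "_orig_mod.") 0
    have ha2 := foldl_count (state.map Prod.fst) (fun k => PySem.Str.startswith k "module.") 0
    rw [zero_add] at ha1 ha2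
    have hkey : (List.map (fun x : String × Int => x.1) state) = state.map Prod.fst := rfl
    simp only [if_neg hne, hkey, hc1, hc2, List.length_map]
    by_cases hA1 : (state.map Prod.fst).all (fun k => PySem.Str.startswith k "_orig_mod.") = true
    · have hk1 : List.countP (fun k => PySem.Str.startswith k "_orig_mod.") (state.map Prod.fst) = state.length := by
        simpa using (all_iff_countP_eq _ _).mp hA1
      have hfind : List.find? (fun p => (state.map Prod.fst).all fun k => PySem.Str.startswith k p)
          ["_orig_mod.", "module."] = some "_orig_mod." := List.find?_cons_of_pos hA1
      rw [hfind, if_pos (show ((List.countP (fun k => PySem.Str.startswith k "_orig_mod.") (state.map Prod.fst) : Int)) = (state.length : Int) from by exact_mod_cast hk1)]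
      show (stripPrefixA state "_orig_mod.", "strip_all:" ++ "_orig_mod.")
          = (stripPrefixB state "_orig_mod.", "strip_all:_orig_mod.")
      rw [strip_eq]
      congr 1
    · have hk1 : List.countP (fun k => PySem.Str.startswith k "_orig_mod.") (state.map Prod.fst) ≠ state.length := by
        intro h
        exact hA1 ((all_iff_countP_eq _ _).mpr (by simpa using h))
      have hcne1 : ¬ ((List.countP (fun k => PySem.Str.startswith k "_orig_mod.") (state.map Prod.fst) : Int) = (state.length : Int)) := by
        exact_mod_cast hk1
      by_cases hA2 : (state.map Prod.fst).all (fun k => PySem.Str.startswith k "module.") = true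
      · have hk2 : List.countP (fun k => PySem.Str.startswith k "module.") (state.map Prod.fst) = state.length := by
          simpa using (all_iff_countP_eq _ _).mp hA2
        have hfind : List.find? (fun p => (state.map Prod.fst).all fun k => PySem.Str.startswith k p)
            ["_orig_mod.", "module."] = some "module." := by
          exact (List.find?_cons_of_neg (p := fun p => (List.map Prod.fst state).all fun k => PySem.Str.startswith k p) hA1).trans (List.find?_cons_of_pos hA2)
        rw [hfind, if_neg hcne1,
            if_pos (show ((List.countP (fun k => PySem.Str.startswith k "module.") (state.map Prod.fst) : Int)) = (state.length : Int) from by exact_mod_cast hk2)]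
        show (stripPrefixA state "module.", "strip_all:" ++ "module.")
            = (stripPrefixB state "module.", "strip_all:module.")
        rw [strip_eq]
        congr 1
      · have hk2 : List.countP (fun k => PySem.Str.startswith k "module.") (state.map Prod.fst) ≠ state.length := by
          intro h
          exact hA2 ((all_iff_countP_eq _ _).mpr (by simpa using h))
        have hcne2 : ¬ ((List.countP (fun k => PySem.Str.startswith k "module.") (state.map Prod.fst) : Int) = (state.length : Int)) := by
          exact_mod_cast hk2
        have hfind : List.find? (fun p => (state.map Prod.fst).all fun k => PySem.Str.startswith k p)
            ["_orig_mod.", "module."] = none := by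
          exact (List.find?_cons_of_neg (p := fun p => (List.map Prod.fst state).all fun k => PySem.Str.startswith k p) hA1).trans ((List.find?_cons_of_neg (p := fun p => (List.map Prod.fst state).all fun k => PySem.Str.startswith k p) hA2).trans List.find?_nil)
        rw [hfind, if_neg hcne1, if_neg hcne2]
        by_cases hT1 : (pyTrunc09 state.length : Int) ≤
            (List.countP (fun k => PySem.Str.startswith k "_orig_mod.") (state.map Prod.fst) : Int)
        · simp only [List.findSome?_cons, ha1, ha2]
          rw [if_pos hT1,
              if_pos (show (pyTrunc09 state.length : Int) ≤ (List.countP (fun k => PySem.Str.startswith k "_orig_mod.") (state.map Prod.fst) : Int) from hT1)]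
          show (stripPrefixA state "_orig_mod.",
              "strip_most(" ++ PySem.Int.toStr (List.countP (fun k => PySem.Str.startswith k "_orig_mod.") (state.map Prod.fst) : Int) ++ "/" ++ PySem.Int.toStr (state.length : Int) ++ "):" ++ "_orig_mod.")
            = (stripPrefixB state "_orig_mod.",
              "strip_most(" ++ PySem.Int.toStr (List.countP (fun k => PySem.Str.startswith k "_orig_mod.") (state.map Prod.fst) : Int) ++ "/" ++ PySem.Int.toStr (state.length : Int) ++ "):_orig_mod.")
          rw [strip_eq, String.append_assoc]
          congr 1
        · have hT1n : ¬ (pyTrunc09 state.length : Int) ≤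
              (List.countP (fun k => PySem.Str.startswith k "_orig_mod.") (state.map Prod.fst) : Int) := hT1
          by_cases hT2 : (pyTrunc09 state.length : Int) ≤
              (List.countP (fun k => PySem.Str.startswith k "module.") (state.map Prod.fst) : Int)
          · simp only [List.findSome?_cons, List.findSome?_nil, ha1, ha2]
            rw [if_neg hT1n, if_pos hT2, if_neg hT1n,
                if_pos (show (pyTrunc09 state.length : Int) ≤ (List.countP (fun k => PySem.Str.startswith k "module.") (state.map Prod.fst) : Int) from hT2)]
            show (stripPrefixA state "module.",
                "strip_most(" ++ PySem.Int.toStr (List.countP (fun k => PySem.Str.startswith k "module.") (state.map Prod.fst) : Int) ++ "/" ++ PySem.Int.toStr (state.length : Int) ++ "):" ++ "module.")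
              = (stripPrefixB state "module.",
                "strip_most(" ++ PySem.Int.toStr (List.countP (fun k => PySem.Str.startswith k "module.") (state.map Prod.fst) : Int) ++ "/" ++ PySem.Int.toStr (state.length : Int) ++ "):module.")
            rw [strip_eq, String.append_assoc]
            congr 1
          · have hT2n : ¬ (pyTrunc09 state.length : Int) ≤
                (List.countP (fun k => PySem.Str.startswith k "module.") (state.map Prod.fst) : Int) := hT2
            simp only [List.findSome?_cons, List.findSome?_nil, ha1, ha2]
            rw [if_neg hT1n, if_neg hT2n, if_neg hT1n, if_neg hT2n]
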